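-- pv_equiv track=rewrite | github.com/ngoduythinh250601/Codelearn | All/teeNine/teeNine.py | teeNine
-- ===== SOURCE A (Python) =====
-- def teeNine(message):
--     message = message.upper()
--     T9 = ["", "", "ABC", "DEF", "GHI", "JKL", "MNO", "PQRS", "TUV", "WXYZ"]
--     for i in range(2, 10):
--         for c in T9[i]:
--             message = message.replace(c, str(i))
--     cnt, ans = 0, []
--     message = message + "z"
--     for i in range(1, len(message)):
--         if message[i] != message[i - 1]:
--             try:
--                 j = int(message[i - 1])
--                 ans.append(T9[j][cnt % len(T9[j])])
--             except:
--                 ans.append(message[i - cnt - 1 : i])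
--             cnt = 0
--         else:
--             cnt += 1
--     return "".join(ans).lower()
-- ===== SOURCE B (Python) =====
-- _LETTERS = {'2': 'abc', '3': 'def', '4': 'ghi', '5': 'jkl',
--             '6': 'mno', '7': 'pqrs', '8': 'tuv', '9': 'wxyz'}
-- _DIGIT = {c: d for d, ls in _LETTERS.items() for c in ls + ls.upper()}
--
--
-- def teeNine(message):
--     # Simulate a multi-tap phone display: each press of the same key rotates a
--     # letter wheel one step; a key change commits the displayed text.
--     out, key, disp, rot = [], None, '', ''
--     for ch in message:
--         c = _DIGIT.get(ch, ch)
--         if c == key: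
--             if key in _LETTERS:
--                 disp, rot = rot[:1], rot[1:] + rot[:1]
--             else:
--                 disp += c.lower()
--         else:
--             out.append(disp)
--             key = c
--             if c in _LETTERS:
--                 ls = _LETTERS[c]
--                 disp, rot = ls[:1], ls[1:] + ls[:1]
--             else:
--                 disp = c.lower()
--     out.append(disp)
--     return ''.join(out)
-- ===== Notes on version B (the rewrite author's own statement) =====
-- stated objective: alternative
-- what changed: B simulates a multi-tap phone in one stateful pass: each character is mapped through a letter->digit dict and either rotates the current key's letter wheel one step (rot[1:]+rot[:1]) or commits the displayed text and starts a new key; it never rewrites the message with 24 replace passes, never computes a run length, never indexes with (cnt % len), and has no sentinel or try/except.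
import Mathlib
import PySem

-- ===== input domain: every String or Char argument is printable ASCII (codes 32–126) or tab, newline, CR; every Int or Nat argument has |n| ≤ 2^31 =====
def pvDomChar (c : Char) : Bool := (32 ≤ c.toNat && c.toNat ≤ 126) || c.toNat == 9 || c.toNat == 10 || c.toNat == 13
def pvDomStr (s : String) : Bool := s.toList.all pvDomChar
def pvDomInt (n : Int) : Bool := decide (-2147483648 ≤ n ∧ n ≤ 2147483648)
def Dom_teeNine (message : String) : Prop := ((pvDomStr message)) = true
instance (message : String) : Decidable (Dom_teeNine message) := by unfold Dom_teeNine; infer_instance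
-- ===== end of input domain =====

-- B simulates a multi-tap phone in one stateful pass (a dict encode plus a rotating
-- letter wheel committed on key change) instead of A's 24 replace passes, sentinel,
-- run counting and try/except (objective: alternative); no argument is mutated.

-- ===== PORT A =====
def pvT9A : List (List Char) :=
  [[], [], ['A','B','C'], ['D','E','F'], ['G','H','I'], ['J','K','L'],
   ['M','N','O'], ['P','Q','R','S'], ['T','U','V'], ['W','X','Y','Z']]

-- the try/except block of A: j = int(message[i-1]); T9[j][cnt % len(T9[j])];
-- on ValueError / ZeroDivisionError / IndexError: message[i-cnt-1:i]
def teeNineTryA (m : List Char) (i cnt : Int) : List Char :=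
  match PySem.Int.ofChars? [PySem.List.pyGetD m (i - 1) ' '] with
  | none => PySem.List.slice m (some (i - cnt - 1)) (some i)
  | some j =>
    match PySem.List.pyGet? pvT9A j with
    | none => PySem.List.slice m (some (i - cnt - 1)) (some i)
    | some row =>
      match PySem.Int.mod? cnt (row.length : Int) with
      | none => PySem.List.slice m (some (i - cnt - 1)) (some i)
      | some k =>
        match PySem.List.pyGet? row k with
        | none => PySem.List.slice m (some (i - cnt - 1)) (some i)
        | some ch => [ch]

-- one iteration of A's `for i in range(1, len(message))` loop, state (cnt, ans)
def teeNineStepA (m : List Char) (st : Int × List (List Char)) (i : Int) :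
    Int × List (List Char) :=
  if PySem.List.pyGetD m i ' ' ≠ PySem.List.pyGetD m (i - 1) ' ' then
    (0, st.2 ++ [teeNineTryA m i st.1])
  else (st.1 + 1, st.2)

-- A's first phase: for i in range(2, 10): for c in T9[i]: message = message.replace(c, str(i))
def teeNineEncodeA (m : List Char) : List Char :=
  (PySem.List.pyRange 2 10).foldl (fun m i =>
    (PySem.List.pyGetD pvT9A i []).foldl (fun m c =>
      PySem.Chars.replace m [c] (PySem.Int.toStr i).toList) m) m

def teeNine (message : String) : String :=
  let m := teeNineEncodeA (PySem.Chars.upper message.toList) ++ ['z']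
  let res := (PySem.List.pyRange 1 (m.length : Int)).foldl (teeNineStepA m) (0, [])
  String.ofList (PySem.Chars.lower (PySem.Chars.join [] res.2))

-- ===== PORT B =====
-- _LETTERS = {'2': 'abc', …, '9': 'wxyz'}
def pvLettersB : PySem.Dict Char (List Char) :=
  PySem.Dict.mk
    [('2', ['a','b','c']), ('3', ['d','e','f']), ('4', ['g','h','i']), ('5', ['j','k','l']),
     ('6', ['m','n','o']), ('7', ['p','q','r','s']), ('8', ['t','u','v']), ('9', ['w','x','y','z'])]

-- _DIGIT = {c: d for d, ls in _LETTERS.items() for c in ls + ls.upper()}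
def pvDigitB : PySem.Dict Char Char :=
  PySem.Dict.ofList (pvLettersB.items.flatMap
    (fun dls => (dls.2 ++ PySem.Chars.upper dls.2).map (fun c => (c, dls.1))))

-- c = _DIGIT.get(ch, ch)
def teeNineEncB (ch : Char) : Char := (PySem.Dict.get? pvDigitB ch).getD ch

-- B's loop state: out, key, disp, rot
structure StB where
  key : Option Char
  disp : List Char
  rot : List Char
  out : List (List Char)
deriving Repr, DecidableEq

-- one iteration of B's `for ch in message` loop; x[:1] = take 1, x[1:] = drop 1
def teeNineStepB (st : StB) (ch : Char) : StB :=
  let c := teeNineEncB ch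
  if some c = st.key then
    if PySem.Dict.contains pvLettersB c then
      { st with disp := st.rot.take 1, rot := st.rot.drop 1 ++ st.rot.take 1 }
    else { st with disp := st.disp ++ [PySem.Chars.lowerChar c] }
  else
    match PySem.Dict.get? pvLettersB c with
    | some ls =>
      { key := some c, disp := ls.take 1, rot := ls.drop 1 ++ ls.take 1,
        out := st.out ++ [st.disp] }
    | none =>
      { key := some c, disp := [PySem.Chars.lowerChar c], rot := st.rot,
        out := st.out ++ [st.disp] }

def teeNine_alt (message : String) : String :=
  let st := message.toList.foldl teeNineStepB ⟨none, [], [], []⟩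
  String.ofList (PySem.Chars.join [] (st.out ++ [st.disp]))

-- ===== PRECONDITION & SPEC =====
def Spec_teeNine (message : String) (out : String) : Prop := out = teeNine_alt message
instance (message : String) (out : String) : Decidable (Spec_teeNine message out) := by unfold Spec_teeNine; infer_instance

-- ===== CLAIM (what is proved, stated in full; the proofs are below) =====
def Claim_equal_teeNine : Prop := ∀ (message : String), Dom_teeNine message → Spec_teeNine message (teeNine message)

-- ===== LEMMAS AND PROOFS =====

theorem pvCharLt127 (c : Char) (h : pvDomChar c = true) : c.toNat < 127 := by
  unfold pvDomChar at h
  simp only [Bool.or_eq_true, Bool.and_eq_true, decide_eq_true_eq, beq_iff_eq] at h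
  omega

-- ---- phase 1 of A: the 24 single-character replaces are one character map ----

theorem pvReplaceGoSingle (c d : Char) :
    ∀ (fuel : Nat) (l acc : List Char), l.length ≤ fuel →
      PySem.Chars.replace.go [c] [d] fuel l acc
        = acc.reverse ++ l.map (fun x => if x = c then d else x) := by
  intro fuel
  induction fuel with
  | zero =>
    intro l acc h
    have : l = [] := List.eq_nil_of_length_eq_zero (Nat.le_zero.mp h)
    subst this
    simp [PySem.Chars.replace.go]
  | succ n ih =>
    intro l acc h
    cases l with
    | nil => simp [PySem.Chars.replace.go]
    | cons x t =>
      rw [PySem.Chars.replace.go]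
      by_cases hxc : x = c
      · subst hxc
        rw [if_pos (by simp [List.isPrefixOf])]
        simp only [List.length_cons, List.length_nil, Nat.zero_add, List.drop_succ_cons,
          List.drop_zero, List.reverse_cons, List.reverse_nil, List.nil_append,
          List.singleton_append]
        rw [ih t (d :: acc) (by simpa using Nat.le_of_succ_le_succ h)]
        simp
      · rw [if_neg (by simp [List.isPrefixOf]; exact fun hc => absurd hc.symm hxc)]
        rw [ih t (x :: acc) (by simpa using Nat.le_of_succ_le_succ h)]
        simp [hxc]

theorem pvReplaceSingle (c d : Char) (l : List Char) :
    PySem.Chars.replace l [c] [d] = l.map (fun x => if x = c then d else x) := by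
  rw [PySem.Chars.replace]
  rw [if_neg (by simp)]
  simpa using pvReplaceGoSingle c d l.length l [] le_rfl

theorem pvMapMap {α β γ : Type} (f : α → β) (g : β → γ) :
    ∀ l : List α, (l.map f).map g = l.map (fun x => g (f x)) := by
  intro l
  induction l with
  | nil => rfl
  | cons x t ih => simp only [List.map_cons]; rw [ih]

theorem pvRowFoldGen (row : List Char) (dc : Char) :
    ∀ m : List Char, row.foldl (fun m c => PySem.Chars.replace m [c] [dc]) m
      = m.map (fun y => row.foldl (fun y c => if y = c then dc else y) y) := by
  induction row with
  | nil => intro m; simp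
  | cons c row ih =>
    intro m
    simp only [List.foldl_cons]
    rw [pvReplaceSingle, ih, pvMapMap]

theorem pvToStrBall : ∀ i ∈ PySem.List.pyRange 2 10,
    (PySem.Int.toStr i).toList = [Char.ofNat (48 + i.toNat)] := by decide

-- the per-digit effect of one row of replaces, as a character function
def pvRowFun (i : Int) (y : Char) : Char :=
  (PySem.List.pyGetD pvT9A i []).foldl
    (fun y c => if y = c then Char.ofNat (48 + i.toNat) else y) y

theorem pvEncodeRow (i : Int) (hi : i ∈ PySem.List.pyRange 2 10) (m : List Char) :
    (PySem.List.pyGetD pvT9A i []).foldl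
        (fun m c => PySem.Chars.replace m [c] (PySem.Int.toStr i).toList) m
      = m.map (pvRowFun i) := by
  rw [pvToStrBall i hi]
  unfold pvRowFun
  exact pvRowFoldGen _ _ m

theorem pvFoldlMapExchange {α : Type} (g : α → Char → Char) :
    ∀ (cs : List α) (m : List Char),
      cs.foldl (fun m c => m.map (g c)) m
        = m.map (fun x => cs.foldl (fun y c => g c y) x) := by
  intro cs
  induction cs with
  | nil => intro m; simp
  | cons c cs ih =>
    intro m
    simp only [List.foldl_cons]
    rw [ih, pvMapMap]

-- the whole of A's phase 1, as a character function
def pvEncAfun (x : Char) : Char :=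
  (PySem.List.pyRange 2 10).foldl (fun y i => pvRowFun i y) x

theorem pvEncodeAMap (m : List Char) : teeNineEncodeA m = m.map pvEncAfun := by
  unfold teeNineEncodeA
  have h1 := PySem.List.foldl_congr_mem
    (l := PySem.List.pyRange 2 10) (init := m)
    (f := fun m i => (PySem.List.pyGetD pvT9A i []).foldl
      (fun m c => PySem.Chars.replace m [c] (PySem.Int.toStr i).toList) m)
    (g := fun m i => m.map (pvRowFun i))
    (fun acc i hi => pvEncodeRow i hi acc)
  rw [h1, pvFoldlMapExchange pvRowFun]
  rfl

set_option maxRecDepth 8192 in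
set_option maxHeartbeats 1000000 in
theorem pvEncPointwiseBall : ∀ n : Nat, n < 127 →
    pvEncAfun (PySem.Chars.upperChar (Char.ofNat n)) = teeNineEncB (Char.ofNat n) := by
  decide

set_option maxRecDepth 8192 in
set_option maxHeartbeats 1000000 in
theorem pvEncBDomBall : ∀ n : Nat, n < 127 → pvDomChar (Char.ofNat n) = true →
    pvDomChar (teeNineEncB (Char.ofNat n)) = true ∧
      PySem.Chars.isalpha (teeNineEncB (Char.ofNat n)) = false := by
  decide

theorem pvEncPointwise (c : Char) (h : pvDomChar c = true) :
    pvEncAfun (PySem.Chars.upperChar c) = teeNineEncB c := by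
  have := pvEncPointwiseBall c.toNat (pvCharLt127 c h)
  rwa [Char.ofNat_toNat] at this

theorem pvEncBDom (c : Char) (h : pvDomChar c = true) :
    pvDomChar (teeNineEncB c) = true ∧
      PySem.Chars.isalpha (teeNineEncB c) = false := by
  have := pvEncBDomBall c.toNat (pvCharLt127 c h)
  rw [Char.ofNat_toNat] at this
  exact this h

theorem pvPhaseOne (l : List Char) (hl : ∀ c ∈ l, pvDomChar c = true) :
    teeNineEncodeA (PySem.Chars.upper l) = l.map teeNineEncB := by
  rw [pvEncodeAMap]
  unfold PySem.Chars.upper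
  rw [pvMapMap]
  exact List.map_congr_left fun c hc => pvEncPointwise c (hl c hc)

-- ---- phase 2 of A: the sentinel+index loop flushes run chunks ----

-- A's try/except value once the slice has been resolved to the current run
def pvEmitAres (p : Char) (cnt : Nat) : List Char :=
  match PySem.Int.ofChars? [p] with
  | none => List.replicate (cnt + 1) p
  | some j =>
    match PySem.List.pyGet? pvT9A j with
    | none => List.replicate (cnt + 1) p
    | some row =>
      match PySem.Int.mod? (cnt : Int) (row.length : Int) with
      | none => List.replicate (cnt + 1) p
      | some k =>
        match PySem.List.pyGet? row k with
        | none => List.replicate (cnt + 1) p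
        | some ch => [ch]

theorem pvTryAEmit (m : List Char) (i : Int) (cnt : Nat) (p : Char)
    (hp : PySem.List.pyGetD m (i - 1) ' ' = p)
    (hs : PySem.List.slice m (some (i - (cnt : Int) - 1)) (some i)
            = List.replicate (cnt + 1) p) :
    teeNineTryA m i (cnt : Int) = pvEmitAres p cnt := by
  unfold teeNineTryA pvEmitAres
  rw [hp, hs]

-- A's run-length loop, re-read as structural recursion on the remaining characters
def pvLoopRec : List Char → Char → Nat → List (List Char)
  | [], _, _ => []
  | x :: rest, p, cnt =>
    if x ≠ p then pvEmitAres p cnt :: pvLoopRec rest x 0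
    else pvLoopRec rest p (cnt + 1)

-- slice M [a:j+1] appends M[j]
theorem pvSliceSnoc (M : List Char) (a j : Nat) (haj : a ≤ j) (hj : j < M.length) :
    PySem.List.slice M (some (a : Int)) (some ((j : Int) + 1)) =
      PySem.List.slice M (some (a : Int)) (some (j : Int)) ++ [M[j]] := by
  have h1 : ((j : Int) + 1) = ((j + 1 : Nat) : Int) := by push_cast; ring
  rw [h1, PySem.List.slice_natCast, PySem.List.slice_natCast]
  have h2 : j + 1 - a = (j - a) + 1 := by omega
  rw [h2, List.take_add_one]
  congr 1
  have h3 : (List.drop a M)[j - a]? = some M[j] := by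
    rw [List.getElem?_drop]
    have h4 : a + (j - a) = j := by omega
    rw [h4, List.getElem?_eq_getElem hj]
  rw [h3]
  rfl

theorem pvSliceSingle (M : List Char) (j : Nat) (hj : j < M.length) :
    PySem.List.slice M (some (j : Int)) (some ((j : Int) + 1)) = [M[j]] := by
  rw [pvSliceSnoc M j j le_rfl hj, PySem.List.slice_natCast]
  simp

-- A's index loop over M = encoded ++ ['z'], from index i0 on, equals pvLoopRec,
-- given the invariant that M[i0-cnt-1:i0] is a run of cnt+1 copies of p = M[i0-1]
theorem pvLoopAChar (M : List Char) :
    ∀ (n i0 cnt : Nat) (ans : List (List Char)) (p : Char),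
      M.length - i0 = n → 1 ≤ i0 → i0 ≤ M.length →
      M[i0 - 1]? = some p →
      PySem.List.slice M (some ((i0 : Int) - (cnt : Int) - 1)) (some (i0 : Int))
        = List.replicate (cnt + 1) p →
      ((PySem.List.pyRange (i0 : Int) (M.length : Int)).foldl (teeNineStepA M)
          ((cnt : Int), ans)).2
        = ans ++ pvLoopRec (M.drop i0) p cnt := by
  intro n
  induction n with
  | zero =>
    intro i0 cnt ans p hn h1 h2 hp hs
    have hi0 : i0 = M.length := by omega
    subst hi0
    rw [PySem.List.pyRange_one_eq_nil le_rfl]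
    simp [pvLoopRec]
  | succ n ih =>
    intro i0 cnt ans p hn h1 h2 hp hs
    have hlt : i0 < M.length := by omega
    rw [PySem.List.pyRange_one_cons (by exact_mod_cast hlt), List.foldl_cons]
    have hq : PySem.List.pyGetD M (i0 : Int) ' ' = M[i0] := by
      rw [PySem.List.pyGetD_natCast, List.getD_eq_getElem?_getD,
        List.getElem?_eq_getElem hlt]
      rfl
    have hcast : ((i0 : Int) - 1) = ((i0 - 1 : Nat) : Int) := by omega
    have hp' : PySem.List.pyGetD M ((i0 : Int) - 1) ' ' = p := by
      rw [hcast, PySem.List.pyGetD_natCast, List.getD_eq_getElem?_getD, hp]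
      rfl
    have hcle : cnt + 1 ≤ i0 := by
      have hlen := congrArg List.length hs
      rw [PySem.List.length_slice] at hlen
      simp only [List.length_replicate] at hlen
      have hA := PySem.List.clampIdx_le M.length ((i0 : Int) - (cnt : Int) - 1)
      have hB : PySem.List.clampIdx M.length (i0 : Int) = min i0 M.length :=
        PySem.List.clampIdx_natCast M.length i0
      omega
    have hdrop : M.drop i0 = M[i0] :: M.drop (i0 + 1) := List.drop_eq_getElem_cons hlt
    by_cases hepq : M[i0] = p
    · have hstep : teeNineStepA M ((cnt : Int), ans) (i0 : Int) = ((cnt : Int) + 1, ans) := by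
        unfold teeNineStepA
        rw [if_neg]
        simp [hq, hp', hepq]
      rw [hstep]
      have hone : ((cnt : Int) + 1) = (((cnt + 1 : Nat)) : Int) := by push_cast; ring
      have hrange : ((i0 : Int) + 1) = (((i0 + 1 : Nat)) : Int) := by push_cast; ring
      rw [hone, hrange]
      rw [ih (i0 + 1) (cnt + 1) ans p (by omega) (by omega) (by omega)
        (by simpa using (List.getElem?_eq_getElem hlt).trans (congrArg some hepq))
        ?hs2]
      · rw [hdrop, pvLoopRec]
        simp [hepq]
      case hs2 =>
        have e1 : ((i0 + 1 : Nat) : Int) - ((cnt + 1 : Nat) : Int) - 1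
            = ((i0 - cnt - 1 : Nat) : Int) := by omega
        have e2 : ((i0 + 1 : Nat) : Int) = ((i0 : Nat) : Int) + 1 := by push_cast; ring
        rw [e1, e2, pvSliceSnoc M (i0 - cnt - 1) i0 (by omega) hlt]
        have e3 : ((i0 - cnt - 1 : Nat) : Int) = (i0 : Int) - (cnt : Int) - 1 := by
          omega
        rw [e3, hs, hepq, ← List.replicate_succ']
    · have hstep : teeNineStepA M ((cnt : Int), ans) (i0 : Int)
          = (0, ans ++ [pvEmitAres p cnt]) := by
        unfold teeNineStepA
        rw [if_pos]
        · rw [pvTryAEmit M (i0 : Int) cnt p hp' hs]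
        · simp [hq, hp', hepq]
      rw [hstep]
      have hzero : (0 : Int) = (((0 : Nat)) : Int) := rfl
      have hrange : ((i0 : Int) + 1) = (((i0 + 1 : Nat)) : Int) := by push_cast; ring
      rw [hzero, hrange]
      rw [ih (i0 + 1) 0 (ans ++ [pvEmitAres p cnt]) M[i0] (by omega) (by omega) (by omega)
        (by simp) ?hs2]
      · rw [hdrop, pvLoopRec]
        rw [if_pos hepq]
        simp
      case hs2 =>
        have e1 : ((i0 + 1 : Nat) : Int) - ((0 : Nat) : Int) - 1 = ((i0 : Nat) : Int) := by
          push_cast; ring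
        have e2 : ((i0 + 1 : Nat) : Int) = ((i0 : Nat) : Int) + 1 := by push_cast; ring
        rw [e1, e2, pvSliceSingle M i0 hlt]
        rfl

-- ---- B's wheel: what committing the current run displays ----

-- one step of the letter wheel: rot[1:] + rot[:1]
def pvRot1 (xs : List Char) : List Char := xs.drop 1 ++ xs.take 1

-- what B would commit for the current key p after cnt+1 presses
def pvCommitB (p : Char) (cnt : Nat) : List Char :=
  match PySem.Dict.get? pvLettersB p with
  | some ls => (pvRot1^[cnt] ls).take 1
  | none => List.replicate (cnt + 1) (PySem.Chars.lowerChar p)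

-- B's loop invariant for the current run: key p, cnt+1 presses so far
def pvRunInvB (p : Char) (cnt : Nat) (st : StB) : Prop :=
  st.key = some p ∧ st.disp = pvCommitB p cnt ∧
  ∀ ls, PySem.Dict.get? pvLettersB p = some ls → st.rot = pvRot1^[cnt + 1] ls

theorem pvStepSame (p : Char) (cnt : Nat) (st : StB) (ch : Char)
    (hc : teeNineEncB ch = p) (hinv : pvRunInvB p cnt st) :
    pvRunInvB p (cnt + 1) (teeNineStepB st ch) ∧ (teeNineStepB st ch).out = st.out := by
  obtain ⟨hkey, hdisp, hrot⟩ := hinv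
  cases hls : PySem.Dict.get? pvLettersB p with
  | some ls =>
    have hrotv := hrot ls hls
    have hstep : teeNineStepB st ch
        = StB.mk (some p) ((pvRot1^[cnt + 1] ls).take 1) (pvRot1 (pvRot1^[cnt + 1] ls)) st.out := by
      simp only [teeNineStepB]
      rw [hc, hkey, if_pos rfl, PySem.Dict.contains_eq_isSome_get?, hls]
      simp only [Option.isSome_some, if_true]
      rw [hrotv]
      rfl
    rw [hstep]
    refine ⟨⟨rfl, ?_, ?_⟩, rfl⟩
    · show (pvRot1^[cnt + 1] ls).take 1 = pvCommitB p (cnt + 1)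
      simp only [pvCommitB, hls]
    · intro ls' hls'
      rw [hls] at hls'
      cases hls'
      show pvRot1 (pvRot1^[cnt + 1] ls) = pvRot1^[cnt + 1 + 1] ls
      exact (Function.iterate_succ_apply' _ _ _).symm
  | none =>
    have hstep : teeNineStepB st ch
        = StB.mk (some p) (st.disp ++ [PySem.Chars.lowerChar p]) st.rot st.out := by
      simp only [teeNineStepB]
      rw [hc, hkey, if_pos rfl, PySem.Dict.contains_eq_isSome_get?, hls]
      simp only [Option.isSome_none, Bool.false_eq_true, if_false]
    rw [hstep]
    refine ⟨⟨rfl, ?_, ?_⟩, rfl⟩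
    · show st.disp ++ [PySem.Chars.lowerChar p] = pvCommitB p (cnt + 1)
      simp only [pvCommitB, hls] at hdisp ⊢
      rw [hdisp, ← List.replicate_succ']
    · intro ls' hls'
      rw [hls] at hls'
      cases hls'

theorem pvStepNew (st : StB) (ch : Char) (c : Char)
    (hc : teeNineEncB ch = c) (hne : some c ≠ st.key) :
    pvRunInvB c 0 (teeNineStepB st ch) ∧ (teeNineStepB st ch).out = st.out ++ [st.disp] := by
  cases hls : PySem.Dict.get? pvLettersB c with
  | some ls =>
    have hstep : teeNineStepB st ch
        = StB.mk (some c) (ls.take 1) (ls.drop 1 ++ ls.take 1) (st.out ++ [st.disp]) := by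
      simp only [teeNineStepB]
      rw [hc, if_neg hne, hls]
    rw [hstep]
    refine ⟨⟨rfl, ?_, ?_⟩, rfl⟩
    · show ls.take 1 = pvCommitB c 0
      simp only [pvCommitB, hls, Function.iterate_zero_apply]
    · intro ls' hls'
      rw [hls] at hls'
      cases hls'
      show pvRot1 ls = pvRot1^[0 + 1] ls
      rw [Function.iterate_one]
  | none =>
    have hstep : teeNineStepB st ch
        = StB.mk (some c) [PySem.Chars.lowerChar c] st.rot (st.out ++ [st.disp]) := by
      simp only [teeNineStepB]
      rw [hc, if_neg hne, hls]
    rw [hstep]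
    refine ⟨⟨rfl, ?_, ?_⟩, rfl⟩
    · show [PySem.Chars.lowerChar c] = pvCommitB c 0
      simp only [pvCommitB, hls]
      rfl
    · intro ls' hls'
      rw [hls] at hls'
      cases hls'

-- ---- A's flushed chunk, lowered, equals B's committed display ----

theorem pvModSome (cnt L : Nat) (hL : 0 < L) :
    PySem.Int.mod? (cnt : Int) (L : Int) = some ((cnt % L : Nat) : Int) := by
  rw [PySem.Int.mod?, if_neg (by exact_mod_cast hL.ne')]
  exact congrArg some (PySem.Int.mod_natCast cnt L)

-- the wheel is periodic: cnt rotations = cnt % L rotations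
theorem pvRotIterMod (ls : List Char) (L : Nat)
    (hfix : pvRot1^[L] ls = ls) (cnt : Nat) :
    pvRot1^[cnt] ls = pvRot1^[cnt % L] ls := by
  conv_lhs => rw [show cnt = cnt % L + L * (cnt / L) from by
    rw [Nat.mod_add_div]]
  rw [Function.iterate_add_apply, Function.iterate_mul]
  rw [Function.iterate_fixed hfix]

theorem pvChunkDigitAux (p : Char) (cnt : Nat) (rowA ls : List Char) (j : Int) (L : Nat)
    (hofs : PySem.Int.ofChars? [p] = some j)
    (hA : PySem.List.pyGet? pvT9A j = some rowA)
    (hB : PySem.Dict.get? pvLettersB p = some ls)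
    (hLA : rowA.length = L) (hLB : ls.length = L) (hL : 0 < L)
    (hlow : PySem.Chars.lower rowA = ls)
    (hfix : pvRot1^[L] ls = ls)
    (htab : ∀ r, r < L → (pvRot1^[r] ls).take 1 = [ls.getD r ' ']) :
    PySem.Chars.lower (pvEmitAres p cnt) = pvCommitB p cnt := by
  have hr : cnt % L < L := Nat.mod_lt _ hL
  have hLHS : pvEmitAres p cnt = [rowA[cnt % L]'(by omega)] := by
    unfold pvEmitAres
    rw [hofs]
    simp only
    rw [hA]
    simp only
    rw [show PySem.Int.mod? (cnt : Int) ((rowA.length : Nat) : Int)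
        = some ((cnt % L : Nat) : Int) from by rw [hLA]; exact pvModSome cnt L hL]
    simp only
    rw [show PySem.List.pyGet? rowA ((cnt % L : Nat) : Int)
        = some (rowA[cnt % L]'(by omega)) from by
      rw [PySem.List.pyGet?_natCast, List.getElem?_eq_getElem (by omega)]]
  rw [hLHS]
  simp only [pvCommitB, hB]
  rw [pvRotIterMod ls L hfix cnt, htab _ hr]
  subst hlow
  show [PySem.Chars.lowerChar (rowA[cnt % L]'(by omega))]
      = [(PySem.Chars.lower rowA).getD (cnt % L) ' ']
  have hlen : cnt % L < (PySem.Chars.lower rowA).length := by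
    unfold PySem.Chars.lower
    rw [List.length_map, hLA]
    omega
  rw [List.getD_eq_getElem _ _ hlen]
  unfold PySem.Chars.lower
  rw [List.getElem_map]

theorem pvDigitMemBall : ∀ n : Nat, n < 127 →
    ('2' ≤ Char.ofNat n ∧ Char.ofNat n ≤ '9') →
    Char.ofNat n ∈ ['2','3','4','5','6','7','8','9'] := by decide

theorem pvNonIntBall : ∀ n : Nat, n < 127 →
    (pvDomChar (Char.ofNat n) && !(Char.ofNat n == '0') && !(Char.ofNat n == '1')
      && !(decide ('2' ≤ Char.ofNat n ∧ Char.ofNat n ≤ '9'))) = true →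
    PySem.Int.ofChars? [Char.ofNat n] = none := by decide

theorem pvNonKeyBall : ∀ n : Nat, n < 127 →
    ¬('2' ≤ Char.ofNat n ∧ Char.ofNat n ≤ '9') →
    PySem.Dict.get? pvLettersB (Char.ofNat n) = none := by decide

theorem pvChunkRepAux (p : Char) (cnt : Nat)
    (hrep : pvEmitAres p cnt = List.replicate (cnt + 1) p)
    (hnone : PySem.Dict.get? pvLettersB p = none) :
    PySem.Chars.lower (pvEmitAres p cnt) = pvCommitB p cnt := by
  rw [hrep, pvCommitB, hnone]
  show List.map _ _ = _
  rw [List.map_replicate]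

set_option maxRecDepth 8192 in
set_option maxHeartbeats 1000000 in
theorem pvChunk (p : Char) (hp : pvDomChar p = true) (cnt : Nat) :
    PySem.Chars.lower (pvEmitAres p cnt) = pvCommitB p cnt := by
  by_cases hd : '2' ≤ p ∧ p ≤ '9'
  · have hmem : p ∈ ['2','3','4','5','6','7','8','9'] := by
      have := pvDigitMemBall p.toNat (pvCharLt127 p hp)
      rw [Char.ofNat_toNat] at this
      exact this hd
    fin_cases hmem
    · exact pvChunkDigitAux _ cnt ['A','B','C'] ['a','b','c'] 2 3 (by decide) (by decide)
        (by decide) (by decide) (by decide) (by decide) (by decide) (by decide) (by decide)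
    · exact pvChunkDigitAux _ cnt ['D','E','F'] ['d','e','f'] 3 3 (by decide) (by decide)
        (by decide) (by decide) (by decide) (by decide) (by decide) (by decide) (by decide)
    · exact pvChunkDigitAux _ cnt ['G','H','I'] ['g','h','i'] 4 3 (by decide) (by decide)
        (by decide) (by decide) (by decide) (by decide) (by decide) (by decide) (by decide)
    · exact pvChunkDigitAux _ cnt ['J','K','L'] ['j','k','l'] 5 3 (by decide) (by decide)
        (by decide) (by decide) (by decide) (by decide) (by decide) (by decide) (by decide)
    · exact pvChunkDigitAux _ cnt ['M','N','O'] ['m','n','o'] 6 3 (by decide) (by decide)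
        (by decide) (by decide) (by decide) (by decide) (by decide) (by decide) (by decide)
    · exact pvChunkDigitAux _ cnt ['P','Q','R','S'] ['p','q','r','s'] 7 4 (by decide) (by decide)
        (by decide) (by decide) (by decide) (by decide) (by decide) (by decide) (by decide)
    · exact pvChunkDigitAux _ cnt ['T','U','V'] ['t','u','v'] 8 3 (by decide) (by decide)
        (by decide) (by decide) (by decide) (by decide) (by decide) (by decide) (by decide)
    · exact pvChunkDigitAux _ cnt ['W','X','Y','Z'] ['w','x','y','z'] 9 4 (by decide) (by decide)
        (by decide) (by decide) (by decide) (by decide) (by decide) (by decide) (by decide)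
  · have hnone : PySem.Dict.get? pvLettersB p = none := by
      have := pvNonKeyBall p.toNat (pvCharLt127 p hp)
      rw [Char.ofNat_toNat] at this
      exact this hd
    by_cases h0 : p = '0'
    · subst h0
      refine pvChunkRepAux _ cnt ?_ hnone
      unfold pvEmitAres
      rw [show PySem.Int.ofChars? ['0'] = some 0 from by decide]
      simp only
      rw [show PySem.List.pyGet? pvT9A 0 = some [] from by decide]
      simp only
      rw [show PySem.Int.mod? ((cnt : Nat) : Int) ((([] : List Char).length : Nat) : Int)
        = none from by simp [PySem.Int.mod?]]
    · by_cases h1 : p = '1'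
      · subst h1
        refine pvChunkRepAux _ cnt ?_ hnone
        unfold pvEmitAres
        rw [show PySem.Int.ofChars? ['1'] = some 1 from by decide]
        simp only
        rw [show PySem.List.pyGet? pvT9A 1 = some [] from by decide]
        simp only
        rw [show PySem.Int.mod? ((cnt : Nat) : Int) ((([] : List Char).length : Nat) : Int)
          = none from by simp [PySem.Int.mod?]]
      · refine pvChunkRepAux _ cnt ?_ hnone
        have hint : PySem.Int.ofChars? [p] = none := by
          have := pvNonIntBall p.toNat (pvCharLt127 p hp)
          rw [Char.ofNat_toNat] at this
          exact this (by simp [hp, h0, h1, hd])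
        unfold pvEmitAres
        rw [hint]

-- ---- B's fold over the rest of the message flushes exactly A's chunks, lowered ----

set_option maxRecDepth 16384 in
set_option maxHeartbeats 1000000 in
theorem pvLoopB (rest : List Char) : ∀ (p : Char) (cnt : Nat) (st : StB),
    (∀ x ∈ rest, pvDomChar x = true) →
    pvDomChar p = true → PySem.Chars.isalpha p = false →
    pvRunInvB p cnt st →
    (rest.foldl teeNineStepB st).out ++ [(rest.foldl teeNineStepB st).disp]
      = st.out ++ (pvLoopRec (rest.map teeNineEncB ++ ['z']) p cnt).map PySem.Chars.lower := by
  induction rest with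
  | nil =>
    intro p cnt st _ hp hpa hinv
    have hz : 'z' ≠ p := by
      intro h
      rw [← h] at hpa
      exact absurd hpa (by decide)
    show st.out ++ [st.disp] = st.out ++ (pvLoopRec ['z'] p cnt).map PySem.Chars.lower
    rw [pvLoopRec, if_pos hz, pvLoopRec]
    rw [List.map_cons, List.map_nil, pvChunk p hp cnt, hinv.2.1]
  | cons x r ih =>
    intro p cnt st hrest hp hpa hinv
    obtain ⟨hxd, hxa⟩ := pvEncBDom x (hrest x (by simp))
    rw [List.foldl_cons, List.map_cons]
    by_cases hc : teeNineEncB x = p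
    · obtain ⟨hinv', hout⟩ := pvStepSame p cnt st x hc hinv
      rw [ih p (cnt + 1) _ (fun c hcm => hrest c (List.mem_cons_of_mem _ hcm)) hp hpa hinv',
        hout]
      congr 1
      rw [hc]
      conv_rhs => rw [List.cons_append, pvLoopRec]
      rw [if_neg (by simp)]
    · obtain ⟨hinv', hout⟩ := pvStepNew st x (teeNineEncB x) rfl
        (by rw [hinv.1]; simp [hc])
      rw [ih (teeNineEncB x) 0 _ (fun c hcm => hrest c (List.mem_cons_of_mem _ hcm)) hxd hxa
        hinv', hout]
      show (st.out ++ [st.disp]) ++ _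
          = st.out ++ (pvLoopRec (teeNineEncB x :: (r.map teeNineEncB ++ ['z'])) p cnt).map _
      rw [pvLoopRec, if_pos hc, List.map_cons]
      rw [pvChunk p hp cnt, hinv.2.1, List.append_assoc]
      rfl

-- ---- glue: "".join with empty separator, and lower through flatten ----

theorem pvJoinNil (ls : List (List Char)) : PySem.Chars.join [] ls = ls.flatten := by
  unfold PySem.Chars.join
  induction ls with
  | nil => rfl
  | cons x t ih =>
    cases t with
    | nil => simp [List.intercalate]
    | cons y s =>
      simp only [List.intercalate, List.intersperse] at ih ⊢
      simp at ih ⊢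
      exact ih

theorem pvLowerFlatten (L : List (List Char)) :
    PySem.Chars.lower L.flatten = (L.map PySem.Chars.lower).flatten := by
  show List.map PySem.Chars.lowerChar L.flatten = _
  rw [List.map_flatten]
  rfl

-- ===== VERDICT (by name: the statement is the Claim_ definition above) =====
set_option maxRecDepth 16384 in
set_option maxHeartbeats 1000000 in
theorem teeNine_spec : Claim_equal_teeNine := by
  intro message hdom
  show teeNine message = teeNine_alt message
  have hl : ∀ c ∈ message.toList, pvDomChar c = true := by
    unfold Dom_teeNine pvDomStr at hdom
    exact fun c hc => List.all_eq_true.mp hdom c hc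
  unfold teeNine teeNine_alt
  rw [pvPhaseOne message.toList hl]
  cases hm : message.toList with
  | nil =>
    decide
  | cons ch t =>
    rw [hm] at hl
    obtain ⟨hcd, hca⟩ := pvEncBDom ch (hl ch (by simp))
    -- A's loop equals pvLoopRec on the encoded tail
    have hfold := pvLoopAChar (((teeNineEncB ch :: t.map teeNineEncB)) ++ ['z'])
      (((teeNineEncB ch :: t.map teeNineEncB) ++ ['z']).length - 1)
      1 0 [] (teeNineEncB ch) rfl (by norm_num) (by simp) (by simp)
      (by
        rw [show ((1 : Nat) : Int) - ((0 : Nat) : Int) - 1 = ((0 : Nat) : Int) from by norm_num]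
        rw [show ((1 : Nat) : Int) = ((0 : Nat) : Int) + 1 from by norm_num]
        rw [pvSliceSingle ((teeNineEncB ch :: t.map teeNineEncB) ++ ['z']) 0 (by simp)]
        rfl)
    rw [show ((1 : Nat) : Int) = (1 : Int) from rfl, show ((0 : Nat) : Int) = (0 : Int) from rfl]
      at hfold
    -- B's first step opens the first run
    obtain ⟨hinv1, hout1⟩ := pvStepNew ⟨none, [], [], []⟩ ch (teeNineEncB ch) rfl (by simp)
    have hB := pvLoopB t (teeNineEncB ch) 0 (teeNineStepB ⟨none, [], [], []⟩ ch)
      (fun c hc => hl c (List.mem_cons_of_mem _ hc)) hcd hca hinv1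
    rw [hout1] at hB
    show String.ofList (PySem.Chars.lower (PySem.Chars.join []
        ((PySem.List.pyRange 1 ((((teeNineEncB ch :: t.map teeNineEncB) ++ ['z']).length : Nat) : Int)).foldl
          (teeNineStepA ((teeNineEncB ch :: t.map teeNineEncB) ++ ['z'])) (0, [])).2))
      = String.ofList (PySem.Chars.join []
          (((ch :: t).foldl teeNineStepB ⟨none, [], [], []⟩).out
            ++ [((ch :: t).foldl teeNineStepB ⟨none, [], [], []⟩).disp]))
    rw [List.foldl_cons, hB, hfold]
    rw [show ((teeNineEncB ch :: t.map teeNineEncB) ++ ['z']).drop 1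
        = t.map teeNineEncB ++ ['z'] from rfl]
    rw [List.nil_append, pvJoinNil, pvJoinNil, pvLowerFlatten]
    simp
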